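-- pv_equiv track=rewrite | github.com/nikonlikes/MSE443-Module-3 | greedy_tote_simulation.py | build_round_robin_queues
-- ===== SOURCE A (Python) =====
-- NUM_CONVEYORS         = 4
--
-- def build_round_robin_queues(orders, totes):
--     """
--     Simple round-robin assignment (baseline comparison).
--     Does NOT guarantee the simultaneous-active constraint.
--     """
--     order_list  = list(orders.keys())
--     conv_queues = [[] for _ in range(NUM_CONVEYORS)]
--     for i, oid in enumerate(order_list):
--         conv_queues[i % NUM_CONVEYORS].append(oid)
--     order_to_conv = {oid: conv_idx
--                      for conv_idx, q in enumerate(conv_queues)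
--                      for oid in q}
--     return conv_queues, order_to_conv
-- ===== SOURCE B (Python) =====
-- NUM_CONVEYORS = 4
--
-- def build_round_robin_queues(orders, totes):
--     """
--     Round-robin assignment via per-conveyor stride slicing:
--     conveyor c gets every NUM_CONVEYORS-th order starting at offset c.
--     """
--     order_list = list(orders.keys())
--     conv_queues = [[order_list[i] for i in range(c, len(order_list), NUM_CONVEYORS)]
--                    for c in range(NUM_CONVEYORS)]
--     order_to_conv = {oid: c for c in range(NUM_CONVEYORS) for oid in conv_queues[c]}
--     return conv_queues, order_to_conv
-- ===== Notes on version B (the rewrite author's own statement) =====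
-- stated objective: idiomatic
-- what changed: Replaces the enumerate/modulo single pass that appends into a mutable bucket per element by a per-conveyor strided traversal (conveyor c takes positions c, c+4, c+8, ...), i.e. four independent slices instead of one dispatching loop.
import Mathlib
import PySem

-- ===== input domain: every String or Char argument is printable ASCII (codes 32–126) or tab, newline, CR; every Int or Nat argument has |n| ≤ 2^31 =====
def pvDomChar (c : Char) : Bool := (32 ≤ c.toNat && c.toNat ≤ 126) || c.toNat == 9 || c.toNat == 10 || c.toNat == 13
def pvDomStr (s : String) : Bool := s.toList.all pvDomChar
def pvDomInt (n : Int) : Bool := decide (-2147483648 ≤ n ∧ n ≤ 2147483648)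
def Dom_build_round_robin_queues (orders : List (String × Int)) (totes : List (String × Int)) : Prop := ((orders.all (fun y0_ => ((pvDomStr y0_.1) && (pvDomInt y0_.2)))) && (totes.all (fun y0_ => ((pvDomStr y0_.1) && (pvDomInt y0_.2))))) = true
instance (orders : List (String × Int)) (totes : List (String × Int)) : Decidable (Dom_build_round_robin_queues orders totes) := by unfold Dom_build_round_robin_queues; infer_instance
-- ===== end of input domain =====

-- B assigns conveyor c its strided slice (positions c, c+4, ...) instead of A's
-- enumerate/modulo dispatch loop; same values, more direct decomposition (objective: idiomatic/alternative).

-- ===== PORT A =====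
def build_round_robin_queues (orders : List (String × Int)) (totes : List (String × Int)) : List (List String) × (List (String × Int)) :=
  let order_list := orders.map (·.1)
  let conv_queues := (List.range 4).map (fun _ => ([] : List String))
  let conv_queues := (PySem.List.enumerate order_list 0).foldl
      (fun qs p => qs.modify (PySem.Int.mod p.1 4).toNat (fun q => q ++ [p.2])) conv_queues
  let order_to_conv := (PySem.List.enumerate conv_queues 0).foldl
      (fun d p => p.2.foldl (fun d oid => d.insert oid p.1) d) (PySem.Dict.empty : PySem.Dict String Int)
  (conv_queues, order_to_conv.items)

-- ===== PORT B =====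
def build_round_robin_queues_alt (orders : List (String × Int)) (totes : List (String × Int)) : List (List String) × (List (String × Int)) :=
  let order_list := orders.map (·.1)
  -- order_list[i] with i drawn from range(c, len, 4) is always in range; pyGetD with a dummy default is exact there
  let conv_queues := (PySem.List.pyRange 0 4 1).map
      (fun c => (PySem.List.pyRange c (order_list.length : Int) 4).map
        (fun i => PySem.List.pyGetD order_list i ""))
  let order_to_conv := (PySem.List.pyRange 0 4 1).foldl
      (fun d c => (PySem.List.pyGetD conv_queues c []).foldl (fun d oid => d.insert oid c) d)
      (PySem.Dict.empty : PySem.Dict String Int)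
  (conv_queues, order_to_conv.items)

-- ===== PRECONDITION & SPEC =====
def Spec_build_round_robin_queues (orders : List (String × Int)) (totes : List (String × Int)) (out : List (List String) × (List (String × Int))) : Prop := out = build_round_robin_queues_alt orders totes
instance (orders : List (String × Int)) (totes : List (String × Int)) (out : List (List String) × (List (String × Int))) : Decidable (Spec_build_round_robin_queues orders totes out) := by unfold Spec_build_round_robin_queues; infer_instance

-- ===== CLAIM (what is proved, stated in full; the proofs are below) =====
def Claim_equal_build_round_robin_queues : Prop := ∀ (orders : List (String × Int)) (totes : List (String × Int)), Dom_build_round_robin_queues orders totes → Spec_build_round_robin_queues orders totes (build_round_robin_queues orders totes)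

-- ===== LEMMAS AND PROOFS =====

-- `pick c n xs`: elements of xs whose (global) position, counting from n, is ≡ c (mod 4) — A's bucket c.
def pick (c : Nat) : Nat → List String → List String
  | _, [] => []
  | n, x :: xs => if n % 4 = c then x :: pick c (n+1) xs else pick c (n+1) xs

-- `pick2 j xs`: take an element when the countdown j hits 0, then restart at 3 — the stride-4 slice.
def pick2 : Nat → List String → List String
  | _, [] => []
  | 0, x :: xs => x :: pick2 3 xs
  | j+1, _ :: xs => pick2 j xs

theorem mod4_cast_toNat (n : Nat) : ((PySem.Int.mod (n : Int) 4).toNat) = n % 4 := by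
  simp [PySem.Int.mod, Int.fmod_eq_emod]
  omega

theorem A_char (xs : List String) : ∀ (n : Nat) (q0 q1 q2 q3 : List String),
    (PySem.List.enumerate xs (n : Int)).foldl
      (fun qs p => qs.modify (PySem.Int.mod p.1 4).toNat (fun q => q ++ [p.2])) [q0, q1, q2, q3]
    = [q0 ++ pick 0 n xs, q1 ++ pick 1 n xs, q2 ++ pick 2 n xs, q3 ++ pick 3 n xs] := by
  induction xs with
  | nil => intro n q0 q1 q2 q3; simp [PySem.List.enumerate_nil, pick]
  | cons x xs ih =>
    intro n q0 q1 q2 q3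
    rw [PySem.List.enumerate_cons]
    have hcast : ((n : Int) + 1) = ((n + 1 : Nat) : Int) := by push_cast; ring
    have h4 : n % 4 = 0 ∨ n % 4 = 1 ∨ n % 4 = 2 ∨ n % 4 = 3 := by omega
    rw [List.foldl_cons, hcast]
    rcases h4 with h | h | h | h
    · have hacc : ([q0, q1, q2, q3].modify (PySem.Int.mod ((n : Int), x).1 4).toNat
          fun q => q ++ [((n : Int), x).2])
          = [q0 ++ [x], q1, q2, q3] := by
        rw [show (PySem.Int.mod ((n : Int), x).1 4).toNat = n % 4 from mod4_cast_toNat n, h]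
        rfl
      rw [hacc, ih]
      simp [pick, h, List.append_assoc]
    · have hacc : ([q0, q1, q2, q3].modify (PySem.Int.mod ((n : Int), x).1 4).toNat
          fun q => q ++ [((n : Int), x).2])
          = [q0, q1 ++ [x], q2, q3] := by
        rw [show (PySem.Int.mod ((n : Int), x).1 4).toNat = n % 4 from mod4_cast_toNat n, h]
        rfl
      rw [hacc, ih]
      simp [pick, h, List.append_assoc]
    · have hacc : ([q0, q1, q2, q3].modify (PySem.Int.mod ((n : Int), x).1 4).toNat
          fun q => q ++ [((n : Int), x).2])
          = [q0, q1, q2 ++ [x], q3] := by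
        rw [show (PySem.Int.mod ((n : Int), x).1 4).toNat = n % 4 from mod4_cast_toNat n, h]
        rfl
      rw [hacc, ih]
      simp [pick, h, List.append_assoc]
    · have hacc : ([q0, q1, q2, q3].modify (PySem.Int.mod ((n : Int), x).1 4).toNat
          fun q => q ++ [((n : Int), x).2])
          = [q0, q1, q2, q3 ++ [x]] := by
        rw [show (PySem.Int.mod ((n : Int), x).1 4).toNat = n % 4 from mod4_cast_toNat n, h]
        rfl
      rw [hacc, ih]
      simp [pick, h, List.append_assoc]

theorem pick_eq_pick2 (xs : List String) : ∀ (c n : Nat), c < 4 →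
    pick c n xs = pick2 ((c + 4 - n % 4) % 4) xs := by
  induction xs with
  | nil => intro c n _; simp [pick, pick2]
  | cons x xs ih =>
    intro c n hc
    by_cases h : n % 4 = c
    · have h0 : (c + 4 - n % 4) % 4 = 0 := by omega
      have h3 : (c + 4 - (n + 1) % 4) % 4 = 3 := by omega
      rw [h0]
      simp only [pick, if_pos h, pick2, ih c (n+1) hc, h3]
    · have hne : (c + 4 - n % 4) % 4 ≠ 0 := by omega
      cases hj : (c + 4 - n % 4) % 4 with
      | zero => exact absurd hj hne
      | succ j =>
        have hj' : (c + 4 - (n + 1) % 4) % 4 = j := by omega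
        simp only [pick, if_neg h, pick2, ih c (n+1) hc, hj']

theorem pyRange_four_nil (a b : Int) (h : b ≤ a) : PySem.List.pyRange a b 4 = [] := by
  rw [PySem.List.pyRange_of_pos a b (by norm_num)]
  simp [show ¬ a < b by omega]

theorem pyRange_four_cons (a b : Int) (h : a < b) :
    PySem.List.pyRange a b 4 = a :: PySem.List.pyRange (a + 4) b 4 := by
  rw [PySem.List.pyRange_of_pos a b (by norm_num), PySem.List.pyRange_of_pos (a+4) b (by norm_num)]
  have hcnt : ((b - a + 4 - 1) / 4).toNat
      = (if a + 4 < b then ((b - (a + 4) + 4 - 1) / 4).toNat else 0) + 1 := by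
    split <;> omega
  rw [if_pos h, hcnt, List.range_succ_eq_map]
  simp [List.map_map, Function.comp]
  intro k _
  ring

theorem B_char (xs : List String) : ∀ (c : Nat),
    (PySem.List.pyRange (c : Int) (xs.length : Int) 4).map (fun i => PySem.List.pyGetD xs i "")
    = pick2 c xs := by
  induction xs with
  | nil =>
    intro c
    rw [pyRange_four_nil _ _ (by simp)]
    simp [pick2]
  | cons x xs ih =>
    intro c
    have hshift : ∀ (a : Nat), 1 ≤ a →
        (PySem.List.pyRange (a : Int) ((xs.length : Int) + 1) 4).map (fun i => PySem.List.pyGetD (x :: xs) i "")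
        = (PySem.List.pyRange ((a : Int) - 1) (xs.length : Int) 4).map (fun i => PySem.List.pyGetD xs i "") := by
      intro a ha
      rw [PySem.List.pyRange_of_pos _ _ (by norm_num : (0:Int) < 4),
          PySem.List.pyRange_of_pos _ _ (by norm_num : (0:Int) < 4)]
      have hb : ((xs.length : Int) + 1 - a + 4 - 1) = ((xs.length : Int) - (a - 1) + 4 - 1) := by ring
      have hif : ((a : Int) < (xs.length : Int) + 1) = (((a : Int) - 1) < (xs.length : Int)) := by
        simp only [eq_iff_iff]; omega
      simp only [hb, hif]
      simp only [List.map_map]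
      apply List.map_congr_left
      intro k _
      simp only [Function.comp]
      have h1 : (a : Int) + 4 * (k : Int) = ((a : Int) - 1 + 4 * (k : Int)) + 1 := by ring
      rw [h1]
      have h0 : 0 ≤ (a : Int) - 1 + 4 * (k : Int) := by omega
      obtain ⟨m, hm⟩ : ∃ m : Nat, (a : Int) - 1 + 4 * (k : Int) = (m : Int) := ⟨_, (Int.toNat_of_nonneg h0).symm⟩
      rw [hm]
      simp only [PySem.List.pyGetD, PySem.List.pyGet?, PySem.List.pyIdx?]
      by_cases hml : m < xs.length <;>
        simp [hml, show (0:Int) ≤ (m:Int) + 1 by omega]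
    cases c with
    | zero =>
      simp only [Nat.cast_zero]
      have hlen : ((x :: xs).length : Int) = (xs.length : Int) + 1 := by push_cast [List.length_cons]; ring
      rw [hlen, pyRange_four_cons 0 ((xs.length : Int) + 1) (by omega)]
      rw [List.map_cons]
      have h4 : ((0:Int) + 4) = ((4 : Nat) : Int) := by norm_num
      rw [h4, hshift 4 (by norm_num)]
      have h3 : ((4 : Nat) : Int) - 1 = ((3 : Nat) : Int) := by norm_num
      rw [h3, ih 3]
      simp [pick2, PySem.List.pyGetD, PySem.List.pyGet?, PySem.List.pyIdx?]
    | succ j =>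
      have hlen : ((x :: xs).length : Int) = (xs.length : Int) + 1 := by push_cast [List.length_cons]; ring
      rw [hlen]
      rw [hshift (j+1) (by omega)]
      have hj : ((j + 1 : Nat) : Int) - 1 = ((j : Nat) : Int) := by push_cast; ring
      rw [hj, ih j]
      simp [pick2]

theorem build_round_robin_queues_spec : Claim_equal_build_round_robin_queues := by
  intro orders totes _
  unfold Spec_build_round_robin_queues build_round_robin_queues build_round_robin_queues_alt
  set xs := orders.map (·.1) with hxs
  have hinit : (List.range 4).map (fun _ => ([] : List String)) = [[], [], [], []] := by decide
  have hq : (PySem.List.enumerate xs 0).foldl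
      (fun qs p => qs.modify (PySem.Int.mod p.1 4).toNat (fun q => q ++ [p.2])) [[], [], [], []]
      = [pick2 0 xs, pick2 1 xs, pick2 2 xs, pick2 3 xs] := by
    have := A_char xs 0 [] [] [] []
    simp only [Nat.cast_zero] at this
    rw [this]
    simp [pick_eq_pick2 xs 0 0 (by norm_num), pick_eq_pick2 xs 1 0 (by norm_num),
          pick_eq_pick2 xs 2 0 (by norm_num), pick_eq_pick2 xs 3 0 (by norm_num)]
  have hq' : (PySem.List.pyRange 0 4 1).map
      (fun c => (PySem.List.pyRange c (xs.length : Int) 4).map (fun i => PySem.List.pyGetD xs i ""))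
      = [pick2 0 xs, pick2 1 xs, pick2 2 xs, pick2 3 xs] := by
    have hr : PySem.List.pyRange 0 4 1 = [(0:Int), 1, 2, 3] := by decide
    rw [hr]
    simp only [List.map_cons, List.map_nil]
    rw [show (0:Int) = ((0:Nat):Int) from rfl, show (1:Int) = ((1:Nat):Int) from rfl,
        show (2:Int) = ((2:Nat):Int) from rfl, show (3:Int) = ((3:Nat):Int) from rfl]
    rw [B_char xs 0, B_char xs 1, B_char xs 2, B_char xs 3]
  simp only [hinit, hq, hq']
  have hdict : (PySem.List.enumerate [pick2 0 xs, pick2 1 xs, pick2 2 xs, pick2 3 xs] 0).foldl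
      (fun d p => p.2.foldl (fun d oid => d.insert oid p.1) d) (PySem.Dict.empty : PySem.Dict String Int)
      = (PySem.List.pyRange 0 4 1).foldl
      (fun d c => (PySem.List.pyGetD [pick2 0 xs, pick2 1 xs, pick2 2 xs, pick2 3 xs] c []).foldl
        (fun d oid => d.insert oid c) d) (PySem.Dict.empty : PySem.Dict String Int) := by
    have hr : PySem.List.pyRange 0 4 1 = [(0:Int), 1, 2, 3] := by decide
    rw [hr]
    simp [PySem.List.enumerate_cons, PySem.List.enumerate_nil,
          PySem.List.pyGetD, PySem.List.pyGet?, PySem.List.pyIdx?]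
  rw [hdict]
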